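-- pv_equiv track=rewrite | github.com/ariecattan/coref | utils.py | split_doc_into_segments
-- ===== SOURCE A (Python) =====
-- def split_doc_into_segments(token_ids, sentence_ids, segment_length=512, with_special_tokens=False):
--     segments = [0]
--     current_token = 0
--     if with_special_tokens:
--         segment_length -= 2
--     while current_token < len(token_ids):
--         end_token = min(len(token_ids) - 1, current_token + segment_length - 1)
--         sentence_end = sentence_ids[end_token]
--         if end_token != len(token_ids) - 1 and sentence_ids[end_token + 1] == sentence_end:
--             while end_token >= current_token and sentence_ids[end_token] == sentence_end:
--                 end_token -= 1
--
--             if end_token < current_token: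
--                 raise ValueError(token_ids)
--
--         current_token = end_token + 1
--         segments.append(current_token)
--
--     return segments
-- ===== SOURCE B (Python) =====
-- def split_doc_into_segments(token_ids, sentence_ids, segment_length=512, with_special_tokens=False):
--     L = segment_length - 2 if with_special_tokens else segment_length
--     n = len(token_ids)
--     # one forward pass: the start index of every maximal run of equal consecutive sentence ids
--     starts = [i for i in range(n) if i == 0 or sentence_ids[i] != sentence_ids[i - 1]]
--     segments = [0]
--     c = 0
--     j = 0
--     while c < n:
--         if c + L >= n:
--             nxt = n
--         else:
--             while j + 1 < len(starts) and starts[j + 1] <= c + L: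
--                 j += 1
--             nxt = starts[j]
--             if nxt <= c:
--                 raise ValueError(token_ids)
--         segments.append(nxt)
--         c = nxt
--     return segments
-- ===== Notes on version B (the rewrite author's own statement) =====
-- stated objective: alternative
-- what changed: B precomputes the start index of every maximal run of equal consecutive sentence ids in one forward pass and then picks each segment boundary by advancing a monotone pointer over that run-start list, instead of A's per-segment backward token-by-token backtracking scan.
import Mathlib
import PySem

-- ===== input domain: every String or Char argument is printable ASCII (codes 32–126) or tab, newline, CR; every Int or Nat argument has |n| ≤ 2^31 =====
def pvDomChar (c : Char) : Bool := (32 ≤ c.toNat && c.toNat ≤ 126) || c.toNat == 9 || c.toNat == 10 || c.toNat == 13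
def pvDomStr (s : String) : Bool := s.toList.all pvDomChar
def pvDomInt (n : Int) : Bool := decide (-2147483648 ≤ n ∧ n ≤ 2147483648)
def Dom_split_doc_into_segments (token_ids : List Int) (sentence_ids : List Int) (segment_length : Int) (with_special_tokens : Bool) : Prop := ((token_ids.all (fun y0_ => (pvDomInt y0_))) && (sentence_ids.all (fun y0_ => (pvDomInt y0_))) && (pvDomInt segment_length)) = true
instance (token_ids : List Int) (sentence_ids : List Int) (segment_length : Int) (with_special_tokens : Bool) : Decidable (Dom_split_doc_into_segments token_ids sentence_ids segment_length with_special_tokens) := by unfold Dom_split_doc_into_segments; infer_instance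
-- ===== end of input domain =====

-- B replaces A's per-segment backward backtracking scan by a precomputed list of
-- sentence-run start indices walked with a monotone forward pointer (alternative decomposition).

-- ===== PORT A =====
-- inner `while end_token >= current_token and sentence_ids[end_token] == sentence_end`
def pvBackA (sid : List Int) (c se : Int) : Int → Nat → Int
  | e, 0 => e
  | e, fuel+1 =>
    if c ≤ e ∧ PySem.List.pyGet? sid e = some se then pvBackA sid c se (e-1) fuel else e

-- outer `while current_token < len(token_ids)`
def pvLoopA (tok sid : List Int) (L : Int) : Int → List Int → Nat → List Int
  | _, segs, 0 => segs
  | c, segs, fuel+1 =>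
    if c < (tok.length : Int) then
      let e := min ((tok.length : Int) - 1) (c + L - 1)
      match PySem.List.pyGet? sid e with
      | none => segs  -- Python raises IndexError here; excluded by Pre_
      | some se =>
        if e ≠ (tok.length : Int) - 1 ∧ PySem.List.pyGet? sid (e+1) = some se then
          let e' := pvBackA sid c se e (e - c + 1).toNat
          if e' < c then segs  -- Python raises ValueError here; excluded by Pre_
          else pvLoopA tok sid L (e'+1) (segs ++ [e'+1]) fuel
        else pvLoopA tok sid L (e+1) (segs ++ [e+1]) fuel
    else segs

def split_doc_into_segments (token_ids : List Int) (sentence_ids : List Int) (segment_length : Int) (with_special_tokens : Bool) : List Int :=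
  let sl := if with_special_tokens then segment_length - 2 else segment_length
  pvLoopA token_ids sentence_ids sl 0 [0] (token_ids.length + 1)

-- ===== PORT B =====
-- `starts = [i for i in range(n) if i == 0 or sentence_ids[i] != sentence_ids[i-1]]`
def pvStarts (sid : List Int) (n : Int) : List Int :=
  (PySem.List.pyRange 0 n 1).filter
    (fun i => i == 0 || (PySem.List.pyGet? sid i != PySem.List.pyGet? sid (i-1)))

-- inner `while j + 1 < len(starts) and starts[j+1] <= c + L`
def pvAdvB (starts : List Int) (x : Int) : Nat → Nat → Nat
  | j, 0 => j
  | j, fuel+1 =>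
    if j+1 < starts.length ∧ starts.getD (j+1) 0 ≤ x then pvAdvB starts x (j+1) fuel else j

-- outer `while c < n`
def pvLoopB (n L : Int) (starts : List Int) : Int → Nat → List Int → Nat → List Int
  | _, _, segs, 0 => segs
  | c, j, segs, fuel+1 =>
    if c < n then
      if n ≤ c + L then pvLoopB n L starts n j (segs ++ [n]) fuel
      else
        let j' := pvAdvB starts (c + L) j starts.length
        let nxt := starts.getD j' 0
        if nxt ≤ c then segs  -- Python raises ValueError here; excluded by Pre_
        else pvLoopB n L starts nxt j' (segs ++ [nxt]) fuel
    else segs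

def split_doc_into_segments_alt (token_ids : List Int) (sentence_ids : List Int) (segment_length : Int) (with_special_tokens : Bool) : List Int :=
  let L := if with_special_tokens then segment_length - 2 else segment_length
  pvLoopB (token_ids.length : Int) L (pvStarts sentence_ids (token_ids.length : Int)) 0 0 [0]
    (token_ids.length + 1)

-- ===== PRECONDITION & SPEC =====
-- Pre_ excludes exactly the inputs where Python A does not return: a nonempty token list with
-- effective segment length < 1 (A loops forever or raises ValueError), sentence_ids shorter than
-- token_ids (IndexError), or more than L equal consecutive sentence ids among the first
-- len(token_ids) entries (ValueError).
def Pre_split_doc_into_segments (token_ids : List Int) (sentence_ids : List Int) (segment_length : Int) (with_special_tokens : Bool) : Prop :=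
  token_ids = [] ∨
    (1 ≤ (if with_special_tokens then segment_length - 2 else segment_length) ∧
     token_ids.length ≤ sentence_ids.length ∧
     ∀ i < token_ids.length,
       i + (if with_special_tokens then segment_length - 2 else segment_length).toNat < token_ids.length →
       ∃ j < (if with_special_tokens then segment_length - 2 else segment_length).toNat,
         sentence_ids.getD (i+j) 0 ≠ sentence_ids.getD (i+j+1) 0)
instance (token_ids : List Int) (sentence_ids : List Int) (segment_length : Int) (with_special_tokens : Bool) : Decidable (Pre_split_doc_into_segments token_ids sentence_ids segment_length with_special_tokens) := by unfold Pre_split_doc_into_segments; infer_instance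

def pvWitness_split_doc_into_segments : List Int × List Int × Int × Bool := ([1, 2, 3], [0, 0, 1], 2, false)

def Spec_split_doc_into_segments (token_ids : List Int) (sentence_ids : List Int) (segment_length : Int) (with_special_tokens : Bool) (out : List Int) : Prop := out = split_doc_into_segments_alt token_ids sentence_ids segment_length with_special_tokens
instance (token_ids : List Int) (sentence_ids : List Int) (segment_length : Int) (with_special_tokens : Bool) (out : List Int) : Decidable (Spec_split_doc_into_segments token_ids sentence_ids segment_length with_special_tokens out) := by unfold Spec_split_doc_into_segments; infer_instance

-- ===== CLAIM (what is proved, stated in full; the proofs are below) =====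
def Claim_equal_split_doc_into_segments : Prop := ∀ (token_ids : List Int) (sentence_ids : List Int) (segment_length : Int) (with_special_tokens : Bool), Dom_split_doc_into_segments token_ids sentence_ids segment_length with_special_tokens → Pre_split_doc_into_segments token_ids sentence_ids segment_length with_special_tokens → Spec_split_doc_into_segments token_ids sentence_ids segment_length with_special_tokens (split_doc_into_segments token_ids sentence_ids segment_length with_special_tokens)

-- ===== LEMMAS AND PROOFS =====

lemma pv_loopA_stop (tok sid : List Int) (L c : Int) (segs : List Int) (fuel : Nat)
    (h : ¬ c < (tok.length : Int)) : pvLoopA tok sid L c segs fuel = segs := by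
  cases fuel <;> simp [pvLoopA, h]

lemma pv_loopB_stop (n L : Int) (starts : List Int) (c : Int) (j : Nat) (segs : List Int)
    (fuel : Nat) (h : ¬ c < n) : pvLoopB n L starts c j segs fuel = segs := by
  cases fuel <;> simp [pvLoopB, h]

lemma pv_mem_starts (sid : List Int) (n x : Int) :
    x ∈ pvStarts sid n ↔
      0 ≤ x ∧ x < n ∧ (x = 0 ∨ PySem.List.pyGet? sid x ≠ PySem.List.pyGet? sid (x-1)) := by
  simp only [pvStarts, List.mem_filter, PySem.List.mem_pyRange_one, Bool.or_eq_true, beq_iff_eq,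
    bne_iff_ne, ne_eq]
  tauto

lemma pv_starts_pairwise (sid : List Int) (n : Int) : (pvStarts sid n).Pairwise (· < ·) :=
  List.Pairwise.sublist List.filter_sublist (PySem.List.pairwise_lt_pyRange_one 0 n)

lemma pv_starts_head (sid : List Int) (n : Int) (h : 0 < n) : (pvStarts sid n)[0]? = some 0 := by
  rw [pvStarts, PySem.List.pyRange_one_cons h]
  simp

-- A's inner backtracking loop lands one before max(run start, current_token).
lemma pv_backA_spec (sid : List Int) (se : Int) :
    ∀ (fuel : Nat) (e c s : Int), 0 ≤ s → s ≤ e + 1 → c ≤ e + 1 → 0 ≤ c →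
      (∀ i, s ≤ i → i ≤ e → PySem.List.pyGet? sid i = some se) →
      (1 ≤ s → PySem.List.pyGet? sid (s-1) ≠ some se) →
      (e + 1 - max s c).toNat ≤ fuel →
      pvBackA sid c se e fuel = max s c - 1 := by
  intro fuel
  induction fuel with
  | zero =>
    intro e c s hs0 hse1 hce1 _ _ _ hfuel
    have : max s c = e + 1 := by omega
    simp [pvBackA, this]
  | succ fuel ih =>
    intro e c s hs0 hse1 hce1 hc0 hconst hbound hfuel
    by_cases hm : max s c = e + 1
    · by_cases hsle : s ≤ e
      · -- then c = e + 1, loop guard fails at once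
        have hc : ¬ c ≤ e := by omega
        simp only [pvBackA]
        rw [if_neg (by tauto)]
        omega
      · -- s = e + 1, value at e differs (or the guard already fails on c)
        have hval : ¬ (c ≤ e ∧ PySem.List.pyGet? sid e = some se) := by
          rintro ⟨hc, hv⟩
          have hs1 : 1 ≤ s := by omega
          have := hbound hs1
          have hse : s - 1 = e := by omega
          rw [hse] at this
          exact this hv
        simp only [pvBackA]
        rw [if_neg hval]
        omega
    · have hmx : max s c ≤ e := by omega
      have he : PySem.List.pyGet? sid e = some se := hconst e (by omega) (by omega)
      simp only [pvBackA]
      rw [if_pos ⟨by omega, he⟩]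
      have := ih (e-1) c s hs0 (by omega) (by omega) hc0
        (fun i h1 h2 => hconst i h1 (by omega)) hbound (by omega)
      rw [this]

-- B's inner pointer advance: lands on an element ≤ x whose successor (if any) is > x.
lemma pv_advB_spec (starts : List Int) (x : Int) :
    ∀ (fuel j : Nat) (v : Int), starts[j]? = some v → v ≤ x →
      ∃ v', starts[pvAdvB starts x j fuel]? = some v' ∧ v' ≤ x ∧
        (starts.length ≤ j + 1 + fuel →
          ∀ w, starts[pvAdvB starts x j fuel + 1]? = some w → x < w) := by
  intro fuel
  induction fuel with
  | zero =>
    intro j v hj hv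
    refine ⟨v, hj, hv, ?_⟩
    intro hlen w hw
    simp only [pvAdvB] at hw hlen
    rw [List.getElem?_eq_none (by omega)] at hw
    exact absurd hw (by simp)
  | succ fuel ih =>
    intro j v hj hv
    simp only [pvAdvB]
    by_cases hcond : j+1 < starts.length ∧ starts.getD (j+1) 0 ≤ x
    · rw [if_pos hcond]
      obtain ⟨hlt, hle⟩ := hcond
      have hj1 : starts[j+1]? = some (starts.getD (j+1) 0) := by
        rw [List.getD_eq_getElem?_getD, List.getElem?_eq_getElem hlt]
        simp
      obtain ⟨v', h1, h2, h3⟩ := ih (j+1) _ hj1 hle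
      exact ⟨v', h1, h2, fun hlen => h3 (by omega)⟩
    · rw [if_neg hcond]
      refine ⟨v, hj, hv, ?_⟩
      intro _ w hw
      push_neg at hcond
      have hlt : j + 1 < starts.length := by
        by_contra h
        rw [List.getElem?_eq_none (by omega)] at hw
        exact absurd hw (by simp)
      have : starts.getD (j+1) 0 = w := by
        rw [List.getD_eq_getElem?_getD, hw]; rfl
      have := hcond hlt
      omega

-- In a <-sorted list, every member above position j' whose value exceeds starts[j'] exceeds x
-- as soon as the successor of j' does.
lemma pv_no_mid (starts : List Int) (hs : starts.Pairwise (· < ·)) (j' : Nat) (v' x : Int)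
    (h1 : starts[j']? = some v')
    (h2 : ∀ w, starts[j'+1]? = some w → x < w) :
    ∀ y ∈ starts, v' < y → x < y := by
  intro y hy hvy
  obtain ⟨k, hk, hky⟩ := List.mem_iff_getElem.mp hy
  have hj'len : j' < starts.length := by
    by_contra h
    rw [List.getElem?_eq_none (by omega)] at h1
    exact absurd h1 (by simp)
  have hv'val : starts[j'] = v' := by
    rw [List.getElem?_eq_getElem hj'len] at h1
    exact Option.some.inj h1
  rw [List.pairwise_iff_getElem] at hs
  have hkj : j' < k := by
    by_contra h
    push_neg at h
    rcases lt_or_eq_of_le h with h' | h'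
    · have := hs k j' hk hj'len h'
      omega
    · subst h'; omega
  have hj1len : j' + 1 < starts.length := by omega
  have hw := h2 starts[j'+1] (List.getElem?_eq_getElem hj1len)
  rcases lt_or_eq_of_le (by omega : j' + 1 ≤ k) with h' | h'
  · have := hs (j'+1) k hj1len hk h'
    omega
  · subst h'; omega

-- Between consecutive run starts the sentence ids are constant.
lemma pv_const_run (sid : List Int) (n : Int) (e se v' : Int)
    (he1n : e + 1 < n) (hv0 : 0 ≤ v')
    (he1 : PySem.List.pyGet? sid (e+1) = some se)
    (hnomid : ∀ y ∈ pvStarts sid n, v' < y → e + 1 < y) :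
    ∀ i, v' ≤ i → i ≤ e + 1 → PySem.List.pyGet? sid i = some se := by
  have key : ∀ d : Nat, v' ≤ e + 1 - (d : Int) → PySem.List.pyGet? sid (e + 1 - (d : Int)) = some se := by
    intro d
    induction d with
    | zero => intro _; simpa using he1
    | succ d ih =>
      intro hd
      have hi1 : PySem.List.pyGet? sid (e + 1 - (d : Int)) = some se := ih (by push_cast; push_cast at hd; omega)
      set i : Int := e + 1 - ((d : Int) + 1) with hidef
      have hii : e + 1 - (d : Int) = i + 1 := by omega
      rw [hii] at hi1
      have hnotmem : (i + 1) ∉ pvStarts sid n := by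
        intro hmem
        have := hnomid _ hmem (by push_cast at hd; omega)
        omega
      rw [pv_mem_starts] at hnotmem
      have heq : ¬(i + 1 = 0 ∨ PySem.List.pyGet? sid (i+1) ≠ PySem.List.pyGet? sid (i+1-1)) := by
        intro h
        exact hnotmem ⟨by push_cast at hd; omega, by push_cast at hd; omega, h⟩
      push_neg at heq
      obtain ⟨-, h⟩ := heq
      have hix : i + 1 - 1 = i := by omega
      rw [hix] at h
      have hgoal : e + 1 - ((d + 1 : Nat) : Int) = i := by push_cast; omega
      rw [hgoal, ← h]
      exact hi1
  intro i h1 h2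
  have hd : i = e + 1 - ((e + 1 - i).toNat : Int) := by omega
  rw [hd]
  exact key _ (by omega)

-- getD/pyGet? bridge on in-range Nat indices
lemma pv_getD_eq (sid : List Int) (m : Nat) (hm : m < sid.length) (se : Int)
    (h : PySem.List.pyGet? sid (m : Int) = some se) : sid.getD m 0 = se := by
  rw [PySem.List.pyGet?_natCast, List.getElem?_eq_getElem hm] at h
  rw [List.getD_eq_getElem?_getD, List.getElem?_eq_getElem hm]
  simpa using h

-- Main loop correspondence.
lemma pv_main (tok sid : List Int) (L : Int) (hL : 1 ≤ L) (hlen : tok.length ≤ sid.length)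
    (hrun : ∀ i < tok.length, i + L.toNat < tok.length →
      ∃ j < L.toNat, sid.getD (i+j) 0 ≠ sid.getD (i+j+1) 0) :
    ∀ (fuel : Nat) (c : Int) (j : Nat) (v : Int) (segs : List Int),
      0 ≤ c → (pvStarts sid (tok.length : Int))[j]? = some v → v ≤ c →
      pvLoopA tok sid L c segs fuel
        = pvLoopB (tok.length : Int) L (pvStarts sid (tok.length : Int)) c j segs fuel := by
  intro fuel
  induction fuel with
  | zero => intro c j v segs _ _ _; rfl
  | succ fuel ih =>
    intro c j v segs hc0 hj hv
    by_cases hcn : c < (tok.length : Int)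
    case neg =>
      rw [pv_loopA_stop _ _ _ _ _ _ hcn, pv_loopB_stop _ _ _ _ _ _ _ hcn]
    case pos =>
    by_cases hbig : (tok.length : Int) ≤ c + L
    · -- last segment: e = n - 1, both append n and stop
      have hmin : min ((tok.length : Int) - 1) (c + L - 1) = (tok.length : Int) - 1 :=
        min_eq_left (by omega)
      have hget := PySem.List.pyGet?_eq_some_getElem (xs := sid) (i := (tok.length : Int) - 1)
        (by omega) (by omega)
      have hn1 : (tok.length : Int) - 1 + 1 = (tok.length : Int) := by omega
      simp only [pvLoopA, pvLoopB]
      rw [if_pos hcn, if_pos hcn, if_pos hbig, hmin]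
      split
      · next heq => rw [hget] at heq; exact absurd heq (by simp)
      · next se heq =>
        rw [if_neg (by simp)]
        rw [hn1, pv_loopA_stop _ _ _ _ _ _ (lt_irrefl _),
          pv_loopB_stop _ _ _ _ _ _ _ (lt_irrefl _)]
    · -- e = c + L - 1 < n - 1
      push_neg at hbig
      have hmin : min ((tok.length : Int) - 1) (c + L - 1) = c + L - 1 :=
        min_eq_right (by omega)
      have harith : c + L - 1 + 1 = c + L := by omega
      obtain ⟨v', hj', hv'x, hsucc⟩ :=
        pv_advB_spec (pvStarts sid (tok.length : Int)) (c + L)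
          (pvStarts sid (tok.length : Int)).length j v hj (by omega)
      have hgt := hsucc (by omega)
      have hnomid := pv_no_mid (pvStarts sid (tok.length : Int))
        (pv_starts_pairwise sid (tok.length : Int)) _ v' (c + L) hj' hgt
      have hv'mem : v' ∈ pvStarts sid (tok.length : Int) := List.mem_of_getElem? hj'
      have hv'char := (pv_mem_starts sid (tok.length : Int) v').mp hv'mem
      obtain ⟨hv'0, hv'n, hv'dis⟩ := hv'char
      have hnxt : (pvStarts sid (tok.length : Int)).getD
          (pvAdvB (pvStarts sid (tok.length : Int)) (c + L) j
            (pvStarts sid (tok.length : Int)).length) 0 = v' := by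
        rw [List.getD_eq_getElem?_getD, hj']; rfl
      have hse := PySem.List.pyGet?_eq_some_getElem (xs := sid) (i := c + L - 1)
        (by omega) (by omega)
      have hw1 := PySem.List.pyGet?_eq_some_getElem (xs := sid) (i := c + L)
        (by omega) (by omega)
      set se : Int := sid[(c + L - 1).toNat]'(by omega) with hsedef
      set w1 : Int := sid[(c + L).toNat]'(by omega) with hw1def
      simp only [pvLoopA, pvLoopB]
      rw [if_pos hcn, if_pos hcn, if_neg (by omega), hmin, hnxt]
      split
      · next heq => rw [hse] at heq; exact absurd heq (by simp)
      · next se2 heq =>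
        have hse2 : se2 = se := by rw [hse] at heq; exact (Option.some.inj heq).symm
        subst hse2
        by_cases hw1se : w1 = se
        · -- the sentence continues past e: A backtracks, B's pointer gives the run start
          have hw1' : PySem.List.pyGet? sid (c + L) = some se := by rw [hw1, hw1se]
          have hnotmem : (c + L) ∉ pvStarts sid (tok.length : Int) := by
            intro hmem
            obtain ⟨-, -, hd⟩ := (pv_mem_starts sid (tok.length : Int) (c + L)).mp hmem
            rcases hd with h | h
            · omega
            · exact h (by rw [hw1', hse])
          have hv'le : v' ≤ c + L - 1 := by
            rcases lt_or_eq_of_le hv'x with h | h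
            · omega
            · exact absurd (h ▸ hv'mem) hnotmem
          have hconst : ∀ i, v' ≤ i → i ≤ c + L → PySem.List.pyGet? sid i = some se := by
            have := pv_const_run sid (tok.length : Int) (c + L - 1) se v'
              (by omega) hv'0
              (by rw [harith]; exact hw1') (by rw [harith]; exact hnomid)
            intro i h1 h2
            exact this i h1 (by omega)
          have hclt : c < v' := by
            by_contra hng
            push_neg at hng
            have hcnat : ((c.toNat : Int)) = c := Int.toNat_of_nonneg hc0
            have hLnat : ((L.toNat : Int)) = L := Int.toNat_of_nonneg (by omega)
            obtain ⟨j0, hj0L, hne⟩ := hrun c.toNat (by omega) (by omega)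
            have h1 := hconst ((c.toNat + j0 : Nat) : Int) (by push_cast; omega)
              (by push_cast; omega)
            have h2 := hconst ((c.toNat + j0 + 1 : Nat) : Int) (by push_cast; omega)
              (by push_cast; omega)
            have g1 := pv_getD_eq sid (c.toNat + j0) (by omega) se h1
            have g2 := pv_getD_eq sid (c.toNat + j0 + 1) (by omega) se h2
            exact hne (by rw [g1, g2])
          have hE' : pvBackA sid c se (c + L - 1) ((c + L - 1) - c + 1).toNat = v' - 1 := by
            have := pv_backA_spec sid se ((c + L - 1) - c + 1).toNat (c + L - 1) c v'
              hv'0 (by omega) (by omega) hc0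
              (fun i h1 h2 => hconst i h1 (by omega))
              (fun h1s => by
                rcases hv'dis with h | h
                · omega
                · intro hcon
                  exact h (by rw [hcon, hconst v' le_rfl (by omega)]))
              (by omega)
            rw [this]
            omega
          rw [if_pos ⟨by omega, by rw [harith]; exact hw1'⟩]
          rw [hE']
          rw [if_neg (by omega), if_neg (by omega)]
          have hv1 : v' - 1 + 1 = v' := by omega
          rw [hv1]
          exact ih v' _ v' _ (by omega) hj' le_rfl
        · -- sentence boundary right after e: no backtracking, B lands on c + L
          have hmem : (c + L) ∈ pvStarts sid (tok.length : Int) := by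
            rw [pv_mem_starts]
            refine ⟨by omega, by omega, Or.inr ?_⟩
            rw [hw1, hse]
            simp [hw1se]
          have hv'eq : v' = c + L := by
            rcases lt_or_eq_of_le hv'x with h | h
            · exact absurd (hnomid _ hmem h) (by omega)
            · exact h
          rw [if_neg (by
            rintro ⟨-, hcon⟩
            rw [harith, hw1] at hcon
            exact hw1se (Option.some.inj hcon))]
          rw [if_neg (by omega)]
          rw [harith]
          have := ih (c + L) _ v' (segs ++ [c + L]) (by omega) hj' (by omega)
          rw [hv'eq]
          exact this

theorem split_doc_into_segments_spec : Claim_equal_split_doc_into_segments := by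
  unfold Claim_equal_split_doc_into_segments
  intro tok sid sl wst _ hpre
  unfold Spec_split_doc_into_segments split_doc_into_segments split_doc_into_segments_alt
  by_cases htok : tok = []
  · subst htok
    simp [pvLoopA, pvLoopB]
  · rcases hpre with h | ⟨hL, hlen, hrun⟩
    · exact absurd h htok
    · have h0 : 0 < tok.length := by
        cases tok with
        | nil => exact absurd rfl htok
        | cons a t => simp
      have hhead := pv_starts_head sid (tok.length : Int) (by exact_mod_cast h0)
      exact pv_main tok sid _ hL hlen hrun (tok.length + 1) 0 0 0 [0] le_rfl hhead le_rfl
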